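-- pv_equiv track=rewrite | github.com/Afeezagbaje/week1-task | dict_comp.py | dict_comp
-- ===== SOURCE A (Python) =====
-- def dict_comp(stop, step):
--     stop_list = [n for n in range(1,stop + 1)]
--
--     ''' dividing the stop_list into a number(step - which the user will provide)
--     of smaller list and removing list which length is
--     less the step (i.e number given by the user)'''
--     stop_yield = [stop_list[i: i + step] for i in range(0, len(stop_list), step)]
--     stop_actual = [n for n in stop_yield if len(n) == step]
--     # this helps in numbering the items i.e items-**
--     items = [f'items-{i + 1}' for i in range(len(stop_actual))]
--     # creating a dictionary that takes the items-** with the corresponding stop_actual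
--     complete_dict = {items[i]:stop_actual[i] for i in range(len(stop_actual))}
--
--     return complete_dict
-- ===== SOURCE B (Python) =====
-- def dict_comp(stop, step):
--     # Single pass: emit each full chunk directly by arithmetic; no full 1..stop
--     # list, no intermediate chunk list, no filtering pass.
--     n = stop if stop > 0 else 0
--     result = {}
--     idx = 1
--     for start in range(0, n, step):
--         if start + step <= n:
--             result[f'items-{idx}'] = list(range(start + 1, start + step + 1))
--             idx += 1
--     return result
-- ===== Notes on version B (the rewrite author's own statement) =====
-- stated objective: alternative
-- what changed: Replaces A's four intermediate lists (full 1..stop list, all slices, filtered slices, key list) and the final dict comprehension with a single loop over range(0, max(stop,0), step) that emits each full chunk directly by arithmetic while counting the key index.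
import Mathlib
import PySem

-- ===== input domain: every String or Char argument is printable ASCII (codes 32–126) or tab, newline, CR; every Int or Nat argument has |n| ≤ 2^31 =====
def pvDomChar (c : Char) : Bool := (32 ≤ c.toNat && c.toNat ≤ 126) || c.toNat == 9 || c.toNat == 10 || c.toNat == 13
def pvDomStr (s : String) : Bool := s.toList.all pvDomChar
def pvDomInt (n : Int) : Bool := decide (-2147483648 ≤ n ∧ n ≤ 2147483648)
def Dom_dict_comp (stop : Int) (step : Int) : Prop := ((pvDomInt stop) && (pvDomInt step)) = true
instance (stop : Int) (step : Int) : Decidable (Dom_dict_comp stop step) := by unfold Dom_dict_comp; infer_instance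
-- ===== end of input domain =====

-- B replaces A's four intermediate lists and dict comprehension with one loop that
-- emits each full chunk directly by arithmetic (alternative single-pass decomposition).


-- ===== PORT A =====
def dict_comp (stop : Int) (step : Int) : List (String × List Int) :=
  let stop_list := PySem.List.pyRange 1 (stop + 1) 1
  let stop_yield := (PySem.List.pyRange 0 (stop_list.length : Int) step).map
      (fun i => PySem.List.slice stop_list (some i) (some (i + step)))
  let stop_actual := stop_yield.filter (fun c => ((c.length : Int) == step))
  let items := (PySem.List.pyRange 0 (stop_actual.length : Int) 1).map
      (fun i => "items-" ++ PySem.Int.toStr (i + 1))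
  ((PySem.List.pyRange 0 (stop_actual.length : Int) 1).foldl
      (fun d i => d.insert (PySem.List.pyGetD items i "") (PySem.List.pyGetD stop_actual i []))
      PySem.Dict.empty).items

-- ===== PORT B =====
def dict_comp_alt (stop : Int) (step : Int) : List (String × List Int) :=
  let n := if stop > 0 then stop else 0
  let r := (PySem.List.pyRange 0 n step).foldl
      (fun (acc : PySem.Dict String (List Int) × Int) start =>
        if start + step ≤ n then
          (acc.1.insert ("items-" ++ PySem.Int.toStr acc.2)
            (PySem.List.pyRange (start + 1) (start + step + 1) 1), acc.2 + 1)
        else acc)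
      (PySem.Dict.empty, 1)
  r.1.items

-- ===== PRECONDITION & SPEC =====
-- Pre_ excludes exactly step = 0, on which Python's range(0, n, 0) raises ValueError in both A and B.
def Pre_dict_comp (stop : Int) (step : Int) : Prop := step ≠ 0
instance (stop : Int) (step : Int) : Decidable (Pre_dict_comp stop step) := by unfold Pre_dict_comp; infer_instance
def pvWitness_dict_comp : Int × Int := (7, 3)

def Spec_dict_comp (stop : Int) (step : Int) (out : List (String × List Int)) : Prop := out = dict_comp_alt stop step
instance (stop : Int) (step : Int) (out : List (String × List Int)) : Decidable (Spec_dict_comp stop step out) := by unfold Spec_dict_comp; infer_instance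

-- ===== CLAIM (what is proved, stated in full; the proofs are below) =====
def Claim_equal_dict_comp : Prop := ∀ (stop : Int) (step : Int), Dom_dict_comp stop step → Pre_dict_comp stop step → Spec_dict_comp stop step (dict_comp stop step)

-- ===== LEMMAS AND PROOFS =====

-- common form both folds reduce to: insert the values in order under keys items-idx, items-(idx+1), …
def pvGo (vs : List (List Int)) (d : PySem.Dict String (List Int)) (idx : Int) : PySem.Dict String (List Int) :=
  match vs with
  | [] => d
  | v :: t => pvGo t (d.insert ("items-" ++ PySem.Int.toStr idx) v) (idx + 1)

theorem pvGo_append (vs : List (List Int)) (v : List Int) (d : PySem.Dict String (List Int)) (idx : Int) :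
    pvGo (vs ++ [v]) d idx = (pvGo vs d idx).insert ("items-" ++ PySem.Int.toStr (idx + vs.length)) v := by
  induction vs generalizing d idx with
  | nil => simp [pvGo]
  | cons h t ih =>
      simp only [List.cons_append, pvGo, ih]
      congr 3
      simp only [List.length_cons]
      push_cast
      ring

-- B's pair-state fold over the chunk list is pvGo
theorem pvFoldB (vs : List (List Int)) (d : PySem.Dict String (List Int)) (idx : Int) :
    (vs.foldl (fun (acc : PySem.Dict String (List Int) × Int) v =>
        (acc.1.insert ("items-" ++ PySem.Int.toStr acc.2) v, acc.2 + 1)) (d, idx)).1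
      = pvGo vs d idx := by
  induction vs generalizing d idx with
  | nil => simp [pvGo]
  | cons h t ih => simpa [pvGo] using ih _ _

-- A's index fold over range(len(sa)) is pvGo
theorem pvFoldA (sa : List (List Int)) (d : PySem.Dict String (List Int)) :
    ((List.range sa.length).foldl (fun d j =>
        d.insert ("items-" ++ PySem.Int.toStr ((j : Int) + 1)) (sa.getD j [])) d)
      = pvGo sa d 1 := by
  induction sa using List.reverseRecOn generalizing d with
  | nil => simp [pvGo]
  | append_singleton t v ih =>
      rw [List.length_append, List.length_cons, List.length_nil, Nat.add_zero, List.range_succ,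
        List.foldl_append]
      rw [PySem.List.foldl_congr_mem (List.range t.length) _
        (fun d (j : Nat) => d.insert ("items-" ++ PySem.Int.toStr ((j : Int) + 1)) (t.getD j [])) d
        (fun acc j hj => by
          rw [List.mem_range] at hj
          rw [List.getD_append _ _ _ _ hj])]
      rw [ih, List.foldl_cons, List.foldl_nil]
      rw [List.getD_append_right _ _ _ _ (by omega), Nat.sub_self]
      rw [pvGo_append]
      congr 3
      omega

-- A's final fold (with its key list and indexing) is pvGo
theorem pvAfold (sa : List (List Int)) :
    ((PySem.List.pyRange 0 (sa.length : Int) 1).foldl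
        (fun d i => d.insert
          (PySem.List.pyGetD ((PySem.List.pyRange 0 (sa.length : Int) 1).map
              (fun i => "items-" ++ PySem.Int.toStr (i + 1))) i "")
          (PySem.List.pyGetD sa i [])) PySem.Dict.empty)
      = pvGo sa PySem.Dict.empty 1 := by
  rw [PySem.List.foldl_congr_mem _ _
    (fun d i => d.insert ("items-" ++ PySem.Int.toStr (i + 1)) (PySem.List.pyGetD sa i []))
    PySem.Dict.empty
    (fun acc i hi => by
      rw [PySem.List.mem_pyRange_one] at hi
      rw [PySem.List.pyGetD_map_pyRange_of_nonneg _ _ _ _ hi.1 hi.2])]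
  rw [PySem.List.pyRange_zero_natCast sa.length, List.foldl_map]
  simp only [PySem.List.pyGetD_natCast]
  exact pvFoldA sa PySem.Dict.empty

-- range with a negative step and stop ≥ start is empty
theorem pvRange_neg_nil (a b s : Int) (hs : s < 0) (hab : a ≤ b) : PySem.List.pyRange a b s = [] := by
  simp only [PySem.List.pyRange]
  rw [if_neg (by omega), if_neg (by omega), if_neg (by omega)]
  simp

-- the slice taken for a full chunk is exactly the chunk range
theorem pvSlice_chunk (stop step i : Int) (hstep : 0 < step) (hi : 0 ≤ i)
    (hfull : i + step ≤ ((stop + 1 - 1).toNat : Int)) :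
    PySem.List.slice (PySem.List.pyRange 1 (stop + 1) 1) (some i) (some (i + step))
      = PySem.List.pyRange (i + 1) (i + step + 1) 1 := by
  rw [PySem.List.slice_toNat _ hi (by omega)]
  rw [PySem.List.pyRange_one_append 1 (i + 1) (stop + 1) (by omega) (by omega)]
  rw [List.drop_left' (by rw [PySem.List.length_pyRange_one]; omega)]
  rw [PySem.List.pyRange_one_append (i + 1) (i + step + 1) (stop + 1) (by omega) (by omega)]
  rw [List.take_left' (by rw [PySem.List.length_pyRange_one]; omega)]

-- a guarded fold is a fold over the filtered list
theorem pvFoldIf (l : List Int) (n step : Int)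
    (f : PySem.Dict String (List Int) × Int → Int → PySem.Dict String (List Int) × Int)
    (init : PySem.Dict String (List Int) × Int) :
    l.foldl (fun acc start => if start + step ≤ n then f acc start else acc) init
      = (l.filter (fun s => decide (s + step ≤ n))).foldl f init := by
  rw [List.foldl_filter]
  simp only [decide_eq_true_eq]

-- ===== VERDICT (by name: the statement is the Claim_ definition above) =====
theorem dict_comp_spec : Claim_equal_dict_comp := by
  intro stop step _ hpre
  unfold Spec_dict_comp
  simp only [dict_comp, dict_comp_alt]
  rw [PySem.List.length_pyRange_one]
  have hn : (if stop > 0 then stop else 0) = (((stop + 1 - 1).toNat : Nat) : Int) := by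
    split <;> omega
  rw [hn]
  rcases lt_or_gt_of_ne hpre with hneg | hpos
  · -- negative step: both drivers are empty
    rw [pvRange_neg_nil _ _ _ hneg (by omega)]
    simp [PySem.List.pyRange_one_eq_nil]
  · -- positive step
    rw [List.filter_map]
    have hfilt :
        (PySem.List.pyRange 0 (((stop + 1 - 1).toNat : Nat) : Int) step).filter
            ((fun c => ((c.length : Int) == step)) ∘
              (fun i => PySem.List.slice (PySem.List.pyRange 1 (stop + 1) 1) (some i) (some (i + step))))
          = (PySem.List.pyRange 0 (((stop + 1 - 1).toNat : Nat) : Int) step).filter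
              (fun i => decide (i + step ≤ (((stop + 1 - 1).toNat : Nat) : Int))) := by
      apply List.filter_congr
      intro i hi
      rw [PySem.List.mem_pyRange_iff_of_pos hpos] at hi
      obtain ⟨h0, hlt, -⟩ := hi
      simp only [Function.comp]
      rw [PySem.List.length_slice]
      have e1 : i = ((i.toNat : Nat) : Int) := by omega
      have e2 : i + step = (((i + step).toNat : Nat) : Int) := by omega
      rw [e2, PySem.List.clampIdx_natCast, e1, PySem.List.clampIdx_natCast,
        PySem.List.length_pyRange_one]
      rw [Bool.eq_iff_iff]
      simp only [beq_iff_eq, decide_eq_true_eq]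
      omega
    rw [hfilt]
    rw [List.map_congr_left (g := fun i => PySem.List.pyRange (i + 1) (i + step + 1) 1)
      (by
        intro i hi
        rw [List.mem_filter] at hi
        obtain ⟨hmem, hful⟩ := hi
        rw [PySem.List.mem_pyRange_iff_of_pos hpos] at hmem
        exact pvSlice_chunk stop step i hpos hmem.1 (by simpa using hful))]
    rw [pvAfold]
    rw [pvFoldIf]
    congr 1
    rw [← pvFoldB]
    simp only [List.foldl_map]
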